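-- pv_equiv track=rewrite | github.com/shizukutanaka/BLNCS | blrcs/utils/auto_remediation.py | _detect_port_scanning
-- ===== SOURCE A (Python) =====
-- from typing import Dict, List, Any, Optional, Set, Tuple, Union, Callable, Awaitable
-- from collections import defaultdict, deque
--
-- def _detect_port_scanning(network_data: Dict[str, Any]) -> bool:
--     """Detect port scanning activity"""
--     connections = network_data.get('connections', [])
--
--     # Group connections by source IP
--     ip_connections = defaultdict(list)
--     for conn in connections:
--         source_ip = conn.get('remote_ip')
--         if source_ip:
--             ip_connections[source_ip].append(conn)
--
--     # Check for multiple connections from same IP to different ports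
--     for ip, conns in ip_connections.items():
--         unique_ports = len(set(conn.get('local_port') for conn in conns))
--         if unique_ports > 10:  # Accessing many ports
--             return True
--
--     return False
-- ===== SOURCE B (Python) =====
-- from collections import defaultdict
--
-- def _detect_port_scanning(network_data):
--     """Detect port scanning activity (single pass, early exit)."""
--     ports_by_ip = defaultdict(set)
--     for conn in network_data.get('connections', []):
--         ip = conn.get('remote_ip')
--         if not ip:
--             continue
--         ports = ports_by_ip[ip]
--         ports.add(conn.get('local_port'))
--         if len(ports) > 10:
--             return True
--     return False
-- ===== Notes on version B (the rewrite author's own statement) =====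
-- stated objective: simpler
-- what changed: Replaces group-into-lists-then-rescan (build per-IP connection lists, then a second pass recomputing each IP's distinct-port set from its list) with a single pass that maintains only the per-IP set of distinct ports and returns True as soon as one set exceeds 10.
import Mathlib
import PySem

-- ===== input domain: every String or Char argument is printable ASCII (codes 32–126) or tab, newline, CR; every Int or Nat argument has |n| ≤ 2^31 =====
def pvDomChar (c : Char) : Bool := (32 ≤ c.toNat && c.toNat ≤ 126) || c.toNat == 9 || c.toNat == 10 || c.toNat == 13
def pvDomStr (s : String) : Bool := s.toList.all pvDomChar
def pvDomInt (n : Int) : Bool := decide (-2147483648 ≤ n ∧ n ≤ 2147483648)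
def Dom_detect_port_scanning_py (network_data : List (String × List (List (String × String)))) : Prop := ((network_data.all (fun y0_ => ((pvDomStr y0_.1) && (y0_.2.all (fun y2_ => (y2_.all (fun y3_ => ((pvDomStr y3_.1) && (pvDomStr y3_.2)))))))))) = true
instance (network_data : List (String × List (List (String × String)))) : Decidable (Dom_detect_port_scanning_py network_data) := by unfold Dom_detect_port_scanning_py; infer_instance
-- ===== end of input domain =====

-- B replaces A's group-into-lists-then-rescan with a single pass keeping only per-IP
-- distinct-port sets and returning True as soon as one exceeds 10 (simpler; return value proved equal).

-- ===== PORT A =====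
-- conn.get(k) on an association-list dict: first-match lookup
def pvConnGet (c : List (String × String)) (k : String) : Option String :=
  (PySem.Dict.mk c).get? k

def detect_port_scanning_py (network_data : List (String × List (List (String × String)))) : Bool :=
  let connections := (PySem.Dict.mk network_data).getD "connections" []
  let ip_connections := connections.foldl (fun d conn =>
      match pvConnGet conn "remote_ip" with
      | some ip => if ip = "" then d else d.modify ip [] (· ++ [conn])
      | none => d) PySem.Dict.empty
  ip_connections.items.any (fun p =>
      10 < (PySem.Set.ofList (p.2.map (fun conn => pvConnGet conn "local_port"))).length)

-- ===== PORT B =====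
def dps_go (conns : List (List (String × String)))
    (d : PySem.Dict String (PySem.Set (Option String))) : Bool :=
  match conns with
  | [] => false
  | c :: rest =>
    match pvConnGet c "remote_ip" with
    | some ip =>
      if ip = "" then dps_go rest d
      else
        let s := PySem.Set.add (d.getD ip PySem.Set.empty) (pvConnGet c "local_port")
        if 10 < s.length then true else dps_go rest (d.insert ip s)
    | none => dps_go rest d

def detect_port_scanning_py_alt (network_data : List (String × List (List (String × String)))) : Bool :=
  dps_go ((PySem.Dict.mk network_data).getD "connections" []) PySem.Dict.empty

-- ===== PRECONDITION & SPEC =====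
def Spec_detect_port_scanning_py (network_data : List (String × List (List (String × String)))) (out : Bool) : Prop := out = detect_port_scanning_py_alt network_data
instance (network_data : List (String × List (List (String × String)))) (out : Bool) : Decidable (Spec_detect_port_scanning_py network_data out) := by unfold Spec_detect_port_scanning_py; infer_instance

-- ===== CLAIM (what is proved, stated in full; the proofs are below) =====
def Claim_equal_detect_port_scanning_py : Prop := ∀ (network_data : List (String × List (List (String × String)))), Dom_detect_port_scanning_py network_data → Spec_detect_port_scanning_py network_data (detect_port_scanning_py network_data)

-- ===== LEMMAS AND PROOFS =====

-- the truthy connections paired with their source IP (proof-only helper)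
def pvPairs (conns : List (List (String × String))) : List (String × List (String × String)) :=
  conns.filterMap (fun c => match pvConnGet c "remote_ip" with
    | some ip => if ip = "" then none else some (ip, c)
    | none => none)

def pvPt (c : List (String × String)) : Option String := pvConnGet c "local_port"

-- distinct local ports of the given IP in a pair list
def pvPorts (l : List (String × List (String × String))) (ip : String) : PySem.Set (Option String) :=
  PySem.Set.ofList ((l.filter (fun p => p.1 == ip)).map (fun p => pvPt p.2))

-- B's loop, restricted to the truthy pairs
def pvGo (pairs : List (String × List (String × String)))
    (d : PySem.Dict String (PySem.Set (Option String))) : Bool :=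
  match pairs with
  | [] => false
  | (ip, c) :: rest =>
    let s := PySem.Set.add (d.getD ip PySem.Set.empty) (pvPt c)
    if 10 < s.length then true else pvGo rest (d.insert ip s)

lemma foldlA_eq_foldl_pairs (conns : List (List (String × String)))
    (d : PySem.Dict String (List (List (String × String)))) :
    conns.foldl (fun d conn =>
      match pvConnGet conn "remote_ip" with
      | some ip => if ip = "" then d else d.modify ip [] (· ++ [conn])
      | none => d) d
    = (pvPairs conns).foldl (fun d p => d.modify p.1 [] (· ++ [p.2])) d := by
  induction conns generalizing d with
  | nil => rfl
  | cons c rest ih =>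
    simp only [List.foldl_cons, pvPairs, List.filterMap_cons]
    cases h : pvConnGet c "remote_ip" with
    | none => simpa [pvPairs] using ih d
    | some ip =>
      by_cases hip : ip = "" <;>
        simp [hip, pvPairs, ih]

lemma dps_go_eq_pvGo (conns : List (List (String × String)))
    (d : PySem.Dict String (PySem.Set (Option String))) :
    dps_go conns d = pvGo (pvPairs conns) d := by
  induction conns generalizing d with
  | nil => rfl
  | cons c rest ih =>
    simp only [dps_go, pvPairs, List.filterMap_cons]
    cases h : pvConnGet c "remote_ip" with
    | none => simpa [pvPairs] using ih d
    | some ip =>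
      by_cases hip : ip = ""
      · simpa [hip, pvPairs] using ih d
      · simp only [hip, if_false]
        by_cases hlen : 10 < (PySem.Set.add (d.getD ip PySem.Set.empty) (pvConnGet c "local_port")).length <;>
          simp [pvGo, pvPairs, pvPt, ih]

lemma ofList_length_le_append {α : Type} [BEq α] [LawfulBEq α] (xs ys : List α) :
    (PySem.Set.ofList xs).length ≤ (PySem.Set.ofList (xs ++ ys)).length := by
  rw [PySem.Set.ofList_append, PySem.Set.update_eq_append_filter]
  simp

lemma pvGo_true_iff (pairs : List (String × List (String × String))) :
    ∀ (done : List (String × List (String × String)))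
      (d : PySem.Dict String (PySem.Set (Option String))),
    (∀ ip, d.getD ip PySem.Set.empty = pvPorts done ip) →
    (∀ ip, (pvPorts done ip).length ≤ 10) →
    (pvGo pairs d = true ↔ ∃ ip, 10 < (pvPorts (done ++ pairs) ip).length) := by
  induction pairs with
  | nil =>
    intro done d hd hk
    rw [show pvGo [] d = false from rfl, List.append_nil]
    simp only [Bool.false_eq_true, false_iff]
    rintro ⟨ip, hip⟩
    have := hk ip
    omega
  | cons p rest ih =>
    rintro done d hd hk
    obtain ⟨ip, c⟩ := p
    have hsing : ∀ ip' : String, ip' ≠ ip →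
        ([((ip, c))].filter (fun p => p.1 == ip')) = [] := by
      intro ip' hne
      have hb : (ip == ip') = false := beq_eq_false_iff_ne.mpr (fun h => hne h.symm)
      simp [List.filter, hb]
    have hs : PySem.Set.add (d.getD ip PySem.Set.empty) (pvPt c)
        = pvPorts (done ++ [(ip, c)]) ip := by
      rw [hd ip]
      unfold pvPorts
      rw [List.filter_append]
      have : ([((ip, c))].filter (fun p => p.1 == ip)) = [(ip, c)] := by simp
      rw [this, List.map_append,
        show List.map (fun p => pvPt p.2) [(ip, c)] = [pvPt c] from rfl,
        PySem.Set.ofList_append_singleton]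
    simp only [pvGo]
    by_cases hlen : 10 < (PySem.Set.add (d.getD ip PySem.Set.empty) (pvPt c)).length
    · simp only [hlen, if_true, true_iff]
      refine ⟨ip, ?_⟩
      have hsplit : pvPorts (done ++ (ip, c) :: rest) ip
          = PySem.Set.ofList ((((done ++ [(ip, c)]).filter (fun p => p.1 == ip)).map (fun p => pvPt p.2))
              ++ ((rest.filter (fun p => p.1 == ip)).map (fun p => pvPt p.2))) := by
        unfold pvPorts
        rw [show done ++ (ip, c) :: rest = (done ++ [(ip, c)]) ++ rest by simp,
            List.filter_append, List.map_append]
      rw [hsplit]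
      have hle := ofList_length_le_append
        (((done ++ [(ip, c)]).filter (fun p => p.1 == ip)).map (fun p => pvPt p.2))
        ((rest.filter (fun p => p.1 == ip)).map (fun p => pvPt p.2))
      rw [hs] at hlen
      unfold pvPorts at hlen
      omega
    · simp only [hlen, if_false]
      rw [show done ++ (ip, c) :: rest = (done ++ [(ip, c)]) ++ rest by simp]
      apply ih (done ++ [(ip, c)])
      · intro ip'
        by_cases hne : ip' = ip
        · subst hne
          rw [PySem.Dict.getD_insert_self, hs]
        · rw [PySem.Dict.getD_insert_of_ne d _ _ hne, hd ip']
          unfold pvPorts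
          rw [List.filter_append, hsing ip' hne, List.append_nil]
      · intro ip'
        by_cases hne : ip' = ip
        · subst hne
          rw [← hs]
          omega
        · unfold pvPorts
          rw [List.filter_append, hsing ip' hne, List.append_nil]
          exact hk ip'

lemma A_true_iff (pairs : List (String × List (String × String))) :
    ((pairs.foldl (fun d p => d.modify p.1 [] (· ++ [p.2]))
        (PySem.Dict.empty : PySem.Dict String (List (List (String × String))))).items.any
      (fun p => 10 < (PySem.Set.ofList (p.2.map (fun conn => pvConnGet conn "local_port"))).length)) = true
    ↔ ∃ ip, 10 < (pvPorts pairs ip).length := by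
  set G := pairs.foldl (fun d p => d.modify p.1 [] (· ++ [p.2]))
      (PySem.Dict.empty : PySem.Dict String (List (List (String × String)))) with hG
  have hnd : G.keys.Nodup :=
    PySem.Dict.nodup_keys_foldl_modify_key pairs Prod.fst [] (fun _ p => (· ++ [p.2]))
      PySem.Dict.empty (by rw [PySem.Dict.keys_empty]; exact List.nodup_nil)
  have hgetD : ∀ ip, G.getD ip [] = (pairs.filter (fun p => p.1 == ip)).map (·.2) := by
    intro ip
    rw [hG]
    simpa using PySem.Dict.getD_foldl_modify_append pairs PySem.Dict.empty ip
  rw [PySem.Dict.items_eq_map_keys G hnd [], List.any_map, List.any_eq_true]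
  constructor
  · rintro ⟨ip, _, hip⟩
    refine ⟨ip, ?_⟩
    simpa [pvPorts, hgetD ip, List.map_map, Function.comp, pvPt] using hip
  · rintro ⟨ip, hip⟩
    have hne : (pairs.filter (fun p => p.1 == ip)) ≠ [] := by
      intro h
      unfold pvPorts at hip
      rw [h] at hip
      simp [PySem.Set.ofList] at hip
    have hmem : ip ∈ G.keys := by
      by_contra hnm
      have hc : G.contains ip = false := by
        cases hcc : G.contains ip
        · rfl
        · exact absurd ((PySem.Dict.contains_iff_mem_keys G ip).mp hcc) hnm
      have h0 := PySem.Dict.getD_of_not_contains G ([] : List (List (String × String))) hc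
      rw [hgetD ip] at h0
      exact hne (List.map_eq_nil_iff.mp h0)
    refine ⟨ip, hmem, ?_⟩
    simpa [pvPorts, hgetD ip, List.map_map, Function.comp, pvPt] using hip

-- ===== VERDICT (by name: the statement is the Claim_ definition above) =====
theorem detect_port_scanning_py_spec : Claim_equal_detect_port_scanning_py := by
  intro nd _
  unfold Spec_detect_port_scanning_py
  simp only [detect_port_scanning_py, detect_port_scanning_py_alt]
  rw [foldlA_eq_foldl_pairs, dps_go_eq_pvGo, Bool.eq_iff_iff, A_true_iff]
  rw [pvGo_true_iff (pvPairs ((PySem.Dict.mk nd).getD "connections" [])) []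
    PySem.Dict.empty
    (by intro ip; rw [PySem.Dict.getD_empty]; rfl)
    (by intro ip; simp [pvPorts, PySem.Set.ofList])]
  simp
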